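-- pv_equiv track=rewrite | github.com/Howyi888/btp2-network-monitor | btp2_monitor/monitor.py | merge_status
-- ===== SOURCE A (Python) =====
-- from typing import Any, Dict, Iterable, List, Optional, Tuple, TypeVar
--
-- T = TypeVar('T')
--
-- def merge_status(status: Dict[Tuple[str,str],T]) -> Dict[Tuple[str,str],List[T]]:
--     new_status: Dict[Tuple[str,str],List[T]] = {}
--     for conn, value in status.items():
--         reverse = conn[0] > conn[1]
--         key = conn if not reverse else (conn[1], conn[0])
--         if key not in new_status:
--             new_status[key] = [ None, None ]
--         sl = new_status[key]
--         sl[reverse] = value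
--     return new_status
-- ===== SOURCE B (Python) =====
-- def merge_status(status):
--     # Collect canonical (min,max) keys in first-seen order, then fill each
--     # slot pair by direct dict lookups (reverse slot is None for self-loops).
--     keys = dict.fromkeys((a, b) if a <= b else (b, a) for (a, b) in status)
--     return {key: [status.get(key),
--                   status.get((key[1], key[0])) if key[0] != key[1] else None]
--             for key in keys}
-- ===== Notes on version B (the rewrite author's own statement) =====
-- stated objective: alternative
-- what changed: A fills a dict in one stateful pass (create [None,None] on first sight, then write slot `reverse` in place); B first collects the canonical (min,max) keys in first-seen order with dict.fromkeys and then builds each [forward, reverse] pair by two direct dict lookups (reverse slot None for self-loops).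
import Mathlib
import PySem

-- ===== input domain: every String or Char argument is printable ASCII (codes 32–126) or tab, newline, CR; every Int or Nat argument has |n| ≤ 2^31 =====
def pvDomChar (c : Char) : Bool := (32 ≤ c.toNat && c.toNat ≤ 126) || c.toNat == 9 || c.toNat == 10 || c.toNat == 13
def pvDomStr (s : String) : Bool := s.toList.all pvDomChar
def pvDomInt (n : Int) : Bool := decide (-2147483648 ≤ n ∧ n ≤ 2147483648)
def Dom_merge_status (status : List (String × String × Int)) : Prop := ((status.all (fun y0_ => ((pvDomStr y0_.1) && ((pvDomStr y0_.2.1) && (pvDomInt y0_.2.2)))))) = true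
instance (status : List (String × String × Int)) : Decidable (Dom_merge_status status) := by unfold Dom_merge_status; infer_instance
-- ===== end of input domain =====

-- B merges bidirectional statuses by collecting canonical keys first and then
-- filling both slots with direct lookups (objective: alternative decomposition,
-- two plain passes instead of A's stateful single pass).

-- ===== PORT A =====
-- A's loop body: canonicalise the key, create the [None, None] slot pair if
-- absent, then write the value at index `reverse` (sl[reverse] = value).
def mergeStep (d : PySem.Dict (String × String) (List (Option Int)))
    (cv : String × String × Int) : PySem.Dict (String × String) (List (Option Int)) :=
  let conn : String × String := (cv.1, cv.2.1)
  let reverse : Bool := decide (conn.2 < conn.1)      -- conn[0] > conn[1]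
  let key : String × String := if reverse then (conn.2, conn.1) else conn
  let d1 := if d.contains key then d else d.insert key [none, none]
  let sl := d1.getD key [none, none]
  d1.insert key (PySem.List.pySetD sl (if reverse then (1 : Int) else 0) (some cv.2.2))

def merge_status (status : List (String × String × Int)) : List (String × String × List (Option Int)) :=
  ((status.foldl mergeStep PySem.Dict.empty).items).map (fun p => (p.1.1, p.1.2, p.2))

-- ===== PORT B =====
-- first-match lookup on the association list = dict .get
def pyDictGet (status : List (String × String × Int)) (k : String × String) : Option Int :=
  (status.find? (fun t => (t.1, t.2.1) == k)).map (fun t => t.2.2)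

-- (a, b) if a <= b else (b, a)
def canonKey (t : String × String × Int) : String × String :=
  if t.1 ≤ t.2.1 then (t.1, t.2.1) else (t.2.1, t.1)

-- [status.get(key), status.get((key[1], key[0])) if key[0] != key[1] else None]
def mergedSlots (status : List (String × String × Int)) (k : String × String) : List (Option Int) :=
  [pyDictGet status k, if k.1 ≠ k.2 then pyDictGet status (k.2, k.1) else none]

def merge_status_alt (status : List (String × String × Int)) : List (String × String × List (Option Int)) :=
  (PySem.List.dedup (status.map canonKey)).map (fun k => (k.1, k.2, mergedSlots status k))

-- ===== PRECONDITION & SPEC =====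
-- Pre_ excludes association lists whose (src, dst) key pairs repeat: they do not
-- encode a Python dict (dict construction collapses duplicates), so the ports'
-- list-level behaviour there is accidental.
def Pre_merge_status (status : List (String × String × Int)) : Prop :=
  (status.map (fun t => (t.1, t.2.1))).Nodup
instance (status : List (String × String × Int)) : Decidable (Pre_merge_status status) := by
  unfold Pre_merge_status; infer_instance

def pvWitness_merge_status : (List (String × String × Int)) :=
  [("a", "b", 1), ("b", "a", 2), ("c", "c", 3)]

def Spec_merge_status (status : List (String × String × Int)) (out : List (String × String × List (Option Int))) : Prop := out = merge_status_alt status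
instance (status : List (String × String × Int)) (out : List (String × String × List (Option Int))) : Decidable (Spec_merge_status status out) := by unfold Spec_merge_status; infer_instance

-- ===== CLAIM (what is proved, stated in full; the proofs are below) =====
def Claim_equal_merge_status : Prop := ∀ (status : List (String × String × Int)), Dom_merge_status status → Pre_merge_status status → Spec_merge_status status (merge_status status)

-- ===== LEMMAS AND PROOFS =====

-- proof-side abbreviations
def keyOf (t : String × String × Int) : String × String := (t.1, t.2.1)
def canonP (p : String × String) : String × String := if p.1 ≤ p.2 then p else (p.2, p.1)

lemma canonKey_eq (t : String × String × Int) : canonKey t = canonP (keyOf t) := by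
  simp [canonKey, canonP, keyOf]

lemma canonP_swap (p : String × String) : canonP (p.2, p.1) = canonP p := by
  rcases p with ⟨a, b⟩
  rcases le_total a b with h | h
  · by_cases h2 : b ≤ a
    · simp [canonP, le_antisymm h h2]
    · simp [canonP, h, h2]
  · by_cases h2 : a ≤ b
    · simp [canonP, le_antisymm h2 h]
    · simp [canonP, h, h2]

lemma canonP_le (p : String × String) : (canonP p).1 ≤ (canonP p).2 := by
  rcases p with ⟨a, b⟩
  by_cases h : a ≤ b
  · simp [canonP, h]
  · simp only [canonP, h, if_false]
    exact le_of_not_ge h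

lemma canonP_fix (p : String × String) (h : p.1 ≤ p.2) : canonP p = p := by
  simp [canonP, h]

lemma get_append_ne (l : List (String × String × Int)) (x : String × String × Int)
    (j : String × String) (h : j ≠ keyOf x) :
    pyDictGet (l ++ [x]) j = pyDictGet l j := by
  have hx : ((x.1, x.2.1) == j) = false := by
    simp only [beq_eq_false_iff_ne]
    exact fun he => h (by simp [keyOf, ← he])
  simp only [pyDictGet, List.find?_append]
  cases hf : l.find? (fun t => (t.1, t.2.1) == j) <;> simp [hf, hx]

lemma get_append_self (l : List (String × String × Int)) (x : String × String × Int)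
    (h : keyOf x ∉ l.map keyOf) :
    pyDictGet (l ++ [x]) (keyOf x) = some x.2.2 := by
  have hnone : l.find? (fun t => (t.1, t.2.1) == keyOf x) = none := by
    rw [List.find?_eq_none]
    intro t ht
    simp only [beq_iff_eq]
    intro he
    exact h (by rw [← he] at *; exact List.mem_map_of_mem ht)
  simp only [pyDictGet, keyOf] at hnone ⊢
  rw [List.find?_append, hnone]
  simp [List.find?]

lemma get_none (l : List (String × String × Int)) (j : String × String)
    (h : canonP j ∉ l.map canonKey) : pyDictGet l j = none := by
  simp only [pyDictGet, Option.map_eq_none_iff]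
  rw [List.find?_eq_none]
  intro t ht
  simp only [beq_iff_eq]
  intro he
  apply h
  have : canonKey t = canonP j := by rw [canonKey_eq]; simp [keyOf] at he ⊢; rw [he]
  rw [← this]; exact List.mem_map_of_mem ht

-- the new element only changes the slots of its own canonical key
lemma slots_append_ne (l : List (String × String × Int)) (x : String × String × Int)
    (k : String × String) (hk : canonP k = k) (hne : k ≠ canonP (keyOf x)) :
    mergedSlots (l ++ [x]) k = mergedSlots l k := by
  have h1 : k ≠ keyOf x := fun he => hne (by rw [← he, hk])
  have h2 : (k.2, k.1) ≠ keyOf x := by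
    intro he
    apply hne
    rw [← he, canonP_swap, hk]
  by_cases hq : k.1 ≠ k.2 <;>
    simp [mergedSlots, get_append_ne l x k h1, get_append_ne l x (k.2, k.1) h2, hq]

-- appending x updates exactly slot `reverse` of its canonical key
lemma slots_append_self (l : List (String × String × Int)) (x : String × String × Int)
    (h : keyOf x ∉ l.map keyOf) :
    mergedSlots (l ++ [x]) (canonP (keyOf x)) =
      PySem.List.pySetD (mergedSlots l (canonP (keyOf x)))
        (if x.2.1 < x.1 then (1 : Int) else 0) (some x.2.2) := by
  by_cases hr : x.2.1 < x.1
  · -- reversed pair: canonical key is (x.2.1, x.1), strictly ordered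
    have hc : canonP (keyOf x) = (x.2.1, x.1) := by
      simp [canonP, keyOf, not_le_of_gt hr]
    have hne12 : x.2.1 ≠ x.1 := ne_of_lt hr
    rw [hc]
    have e1 : pyDictGet (l ++ [x]) (x.2.1, x.1) = pyDictGet l (x.2.1, x.1) := by
      apply get_append_ne
      simp [keyOf]
      intro he; exact absurd he hne12
    have e2 : pyDictGet (l ++ [x]) (x.1, x.2.1) = some x.2.2 := get_append_self l x h
    simp [mergedSlots, hr, hne12, e1, e2, PySem.List.pySetD, PySem.List.pySet?, PySem.List.pyIdx?]
  · -- forward pair (including self-loop): canonical key is keyOf x itself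
    have hle : x.1 ≤ x.2.1 := le_of_not_gt hr
    have hc : canonP (keyOf x) = (x.1, x.2.1) := by simp [canonP, keyOf, hle]
    rw [hc]
    have e2 : pyDictGet (l ++ [x]) (x.1, x.2.1) = some x.2.2 := get_append_self l x h
    by_cases hq : x.1 = x.2.1
    · simp only [hq] at e2
      simp [mergedSlots, hq, e2, PySem.List.pySetD, PySem.List.pySet?, PySem.List.pyIdx?]
    · have e1 : pyDictGet (l ++ [x]) (x.2.1, x.1) = pyDictGet l (x.2.1, x.1) := by
        apply get_append_ne
        simp [keyOf]
        intro he; exact absurd he.symm hq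
      simp [mergedSlots, hr, hq, e1, e2, PySem.List.pySetD, PySem.List.pySet?, PySem.List.pyIdx?]

lemma slots_not_seen (l : List (String × String × Int)) (k : String × String)
    (hk : canonP k = k) (h : k ∉ l.map canonKey) : mergedSlots l k = [none, none] := by
  have g1 : pyDictGet l k = none := get_none l k (by rw [hk]; exact h)
  have g2 : pyDictGet l (k.2, k.1) = none := get_none l (k.2, k.1) (by rw [canonP_swap, hk]; exact h)
  by_cases hq : k.1 ≠ k.2 <;> simp [mergedSlots, g1, g2, hq]

-- every key already collected is canonical
lemma mem_canon_fix (l : List (String × String × Int)) (k : String × String)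
    (h : k ∈ l.map canonKey) : canonP k = k := by
  rcases List.mem_map.mp h with ⟨t, _, ht⟩
  rw [← ht, canonKey_eq, canonP_fix _ (canonP_le _)]

-- A's loop body, re-expressed with the canonical key computed up front
def stepAt (d : PySem.Dict (String × String) (List (Option Int))) (k : String × String)
    (idx : Int) (v : Int) : PySem.Dict (String × String) (List (Option Int)) :=
  let d1 := if d.contains k then d else d.insert k [none, none]
  d1.insert k (PySem.List.pySetD (d1.getD k [none, none]) idx (some v))

lemma mergeStep_eq (d : PySem.Dict (String × String) (List (Option Int)))
    (x : String × String × Int) :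
    mergeStep d x = stepAt d (canonP (keyOf x)) (if x.2.1 < x.1 then (1 : Int) else 0) x.2.2 := by
  by_cases h : x.2.1 < x.1
  · simp [mergeStep, stepAt, canonP, keyOf, h, not_le_of_gt h]
  · simp [mergeStep, stepAt, canonP, keyOf, h, le_of_not_gt h]

-- main invariant: the items of A's dict are B's keys paired with B's slots
lemma fold_items (l : List (String × String × Int)) (h : (l.map keyOf).Nodup) :
    (l.foldl mergeStep PySem.Dict.empty).items =
      (PySem.List.dedup (l.map canonKey)).map (fun k => (k, mergedSlots l k)) := by
  induction l using List.reverseRecOn with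
  | nil => rfl
  | append_singleton l x ih =>
    have hsplit : (l.map keyOf).Nodup ∧ keyOf x ∉ l.map keyOf := by
      rw [List.map_append, List.nodup_append] at h
      exact ⟨h.1, fun hm => h.2.2 _ hm (keyOf x) (by simp) rfl⟩
    obtain ⟨hnd, hnotin⟩ := hsplit
    rw [List.foldl_append, List.foldl_cons, List.foldl_nil, mergeStep_eq]
    have ihh := ih hnd
    have hkeys : (l.foldl mergeStep PySem.Dict.empty).keys = PySem.List.dedup (l.map canonKey) := by
      rw [PySem.Dict.keys, ihh, List.map_map]
      simp [Function.comp_def]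
    have hnodupk : (l.foldl mergeStep PySem.Dict.empty).keys.Nodup := by
      rw [hkeys]; exact PySem.List.nodup_dedup _
    have hmapapp : (l ++ [x]).map canonKey = l.map canonKey ++ [canonP (keyOf x)] := by
      simp [canonKey_eq]
    by_cases hmem : canonP (keyOf x) ∈ l.map canonKey
    · -- the canonical key was seen before: the dict entry is overwritten in place
      have hcont : (l.foldl mergeStep PySem.Dict.empty).contains (canonP (keyOf x)) = true := by
        rw [PySem.Dict.contains_eq_decide_mem_keys, hkeys]
        simp [hmem]
      have hitem : (canonP (keyOf x), mergedSlots l (canonP (keyOf x))) ∈ (l.foldl mergeStep PySem.Dict.empty).items := by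
        rw [ihh]
        exact List.mem_map_of_mem (by rw [PySem.List.mem_dedup]; exact hmem)
      have hgetD : (l.foldl mergeStep PySem.Dict.empty).getD (canonP (keyOf x)) [none, none]
          = mergedSlots l (canonP (keyOf x)) :=
        PySem.Dict.getD_of_mem_items _ hitem hnodupk _
      have hded : PySem.List.dedup (l.map canonKey ++ [canonP (keyOf x)]) = PySem.List.dedup (l.map canonKey) := by
        rw [PySem.List.dedup_eq_ofList, PySem.List.dedup_eq_ofList, PySem.Set.ofList_append_singleton]
        exact PySem.Set.add_of_mem (by rw [PySem.Set.mem_ofList]; exact hmem)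
      rw [stepAt, if_pos hcont, hgetD,
          PySem.Dict.items_insert_of_contains _ _ hcont, ihh, List.map_map,
          hmapapp, hded]
      apply List.map_congr_left
      intro k' hk'
      rw [PySem.List.mem_dedup] at hk'
      by_cases hk : k' = canonP (keyOf x)
      · subst hk
        simp [slots_append_self l x hnotin]
      · have : (k' == canonP (keyOf x)) = false := by simpa using hk
        simp only [Function.comp, this, Bool.false_eq_true, if_false]
        rw [slots_append_ne l x k' (mem_canon_fix l k' hk') hk]
    · -- fresh canonical key: a new [None, None] entry is appended, then filled
      have hcont : (l.foldl mergeStep PySem.Dict.empty).contains (canonP (keyOf x)) = false := by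
        rw [PySem.Dict.contains_eq_decide_mem_keys, hkeys]
        simp [hmem]
      have hded : PySem.List.dedup (l.map canonKey ++ [canonP (keyOf x)]) = PySem.List.dedup (l.map canonKey) ++ [canonP (keyOf x)] := by
        rw [PySem.List.dedup_eq_ofList, PySem.List.dedup_eq_ofList, PySem.Set.ofList_append_singleton]
        exact PySem.Set.add_of_not_mem (by rw [PySem.Set.mem_ofList]; exact hmem)
      have hslots0 : mergedSlots l (canonP (keyOf x)) = [none, none] :=
        slots_not_seen l _ (canonP_fix _ (canonP_le _)) hmem
      rw [stepAt, if_neg (by simp [hcont]), PySem.Dict.getD_insert_self,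
          PySem.Dict.insert_insert_self,
          PySem.Dict.items_insert_of_not_contains _ _ hcont, ihh,
          hmapapp, hded, List.map_append]
      congr 1
      · apply List.map_congr_left
        intro k' hk'
        rw [PySem.List.mem_dedup] at hk'
        have hkne : k' ≠ canonP (keyOf x) := fun he => hmem (he ▸ hk')
        rw [slots_append_ne l x k' (mem_canon_fix l k' hk') hkne]
      · simp [slots_append_self l x hnotin, hslots0]

-- ===== VERDICT (by name: the statement is the Claim_ definition above) =====
theorem merge_status_spec : Claim_equal_merge_status := by
  intro status _ hpre
  unfold Spec_merge_status merge_status merge_status_alt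
  rw [fold_items status hpre, List.map_map]
  rfl
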